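-- pv_equiv track=rewrite | github.com/JackWellsCodes/Python_Parsing_Task | script_2.py | count_books_by_period
-- ===== SOURCE A (Python) =====
-- TIME_PERIODS = [
--     (2002, 2003), (2004, 2005), (2006, 2007),
--     (2008, 2009), (2010, 2011), (2012, 2013), (2014, 2015),
--     (2016, 2017), (2018, 2019), (2020, 2021), (2022, 2023)
-- ]
--
-- def count_books_by_period(parsed_books):
--     """
--     Counts the number of books published in each time period.
--     """
--     period_counts = {period: 0 for period in TIME_PERIODS}
--     for book in parsed_books:
--         _, year, _ = book
--         for start, end in TIME_PERIODS:
--             if start <= year <= end: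
--                 period_counts[(start, end)] += 1
--                 break
--     return period_counts
-- ===== SOURCE B (Python) =====
-- TIME_PERIODS = [
--     (2002, 2003), (2004, 2005), (2006, 2007),
--     (2008, 2009), (2010, 2011), (2012, 2013), (2014, 2015),
--     (2016, 2017), (2018, 2019), (2020, 2021), (2022, 2023)
-- ]
--
-- def count_books_by_period(parsed_books):
--     """
--     Counts the number of books published in each time period
--     using a direct index computation instead of scanning the periods.
--     """
--     counts = [0] * len(TIME_PERIODS)
--     for _, year, _ in parsed_books:
--         if 2002 <= year <= 2023:
--             counts[(year - 2002) // 2] += 1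
--     return {period: c for period, c in zip(TIME_PERIODS, counts)}
-- ===== Notes on version B (the rewrite author's own statement) =====
-- stated objective: simpler
-- what changed: Replaces the inner scan over TIME_PERIODS (with break) by a closed-form bucket index (year-2002)//2 into a flat counts array, zipping it with TIME_PERIODS at the end.
import Mathlib
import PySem

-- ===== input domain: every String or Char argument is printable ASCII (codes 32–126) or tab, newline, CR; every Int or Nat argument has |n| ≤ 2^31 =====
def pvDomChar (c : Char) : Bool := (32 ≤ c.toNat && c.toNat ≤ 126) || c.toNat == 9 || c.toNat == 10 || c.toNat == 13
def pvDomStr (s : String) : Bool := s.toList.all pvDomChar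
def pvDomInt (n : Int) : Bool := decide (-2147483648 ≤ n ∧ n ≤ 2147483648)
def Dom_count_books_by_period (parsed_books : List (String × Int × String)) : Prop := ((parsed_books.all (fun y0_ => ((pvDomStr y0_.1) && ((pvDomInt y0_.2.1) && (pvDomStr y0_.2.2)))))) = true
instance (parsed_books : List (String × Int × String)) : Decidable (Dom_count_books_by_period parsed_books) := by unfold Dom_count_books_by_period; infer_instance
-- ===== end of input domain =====

-- B replaces A's inner period scan by a closed-form bucket index ((year-2002)//2) into a flat counts list (simpler, same result).

-- ===== PORT A =====
def pvTimePeriods : List (Int × Int) :=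
  [(2002, 2003), (2004, 2005), (2006, 2007),
   (2008, 2009), (2010, 2011), (2012, 2013), (2014, 2015),
   (2016, 2017), (2018, 2019), (2020, 2021), (2022, 2023)]

-- A's inner 'for start, end in TIME_PERIODS: … break' loop
def pvFindBump (d : PySem.Dict (Int × Int) Int) (year : Int) :
    List (Int × Int) → PySem.Dict (Int × Int) Int
  | [] => d
  | (s, e) :: rest =>
      if s ≤ year ∧ year ≤ e then d.modify (s, e) 0 (· + 1)
      else pvFindBump d year rest

def count_books_by_period (parsed_books : List (String × Int × String)) : List (Int × Int × Int) :=
  let init := pvTimePeriods.foldl (fun d p => d.insert p 0) PySem.Dict.empty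
  let final := parsed_books.foldl (fun d b => pvFindBump d b.2.1 pvTimePeriods) init
  final.items.map (fun pc => (pc.1.1, pc.1.2, pc.2))

-- ===== PORT B =====
-- counts[i] += 1 (index always in range here)
def pvBump (cs : List Int) (i : Nat) : List Int := cs.set i (cs.getD i 0 + 1)

def count_books_by_period_alt (parsed_books : List (String × Int × String)) : List (Int × Int × Int) :=
  let counts := parsed_books.foldl
    (fun cs b =>
      if 2002 ≤ b.2.1 ∧ b.2.1 ≤ 2023
      then pvBump cs (PySem.Int.floordiv (b.2.1 - 2002) 2).toNat
      else cs)
    (List.replicate 11 (0 : Int))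
  (pvTimePeriods.zip counts).map (fun pc => (pc.1.1, pc.1.2, pc.2))

-- ===== PRECONDITION & SPEC =====
def Spec_count_books_by_period (parsed_books : List (String × Int × String)) (out : List (Int × Int × Int)) : Prop := out = count_books_by_period_alt parsed_books
instance (parsed_books : List (String × Int × String)) (out : List (Int × Int × Int)) : Decidable (Spec_count_books_by_period parsed_books out) := by unfold Spec_count_books_by_period; infer_instance

-- ===== CLAIM (what is proved, stated in full; the proofs are below) =====
def Claim_equal_count_books_by_period : Prop := ∀ (parsed_books : List (String × Int × String)), Dom_count_books_by_period parsed_books → Spec_count_books_by_period parsed_books (count_books_by_period parsed_books)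

-- ===== LEMMAS AND PROOFS =====

-- one step of the two loops preserves the zip invariant (case split over the 22 in-range years)
theorem pv_step (y c0 c1 c2 c3 c4 c5 c6 c7 c8 c9 c10 : Int) :
    pvFindBump (PySem.Dict.mk (pvTimePeriods.zip [c0,c1,c2,c3,c4,c5,c6,c7,c8,c9,c10])) y pvTimePeriods
      = PySem.Dict.mk (pvTimePeriods.zip
          (if 2002 ≤ y ∧ y ≤ 2023
           then pvBump [c0,c1,c2,c3,c4,c5,c6,c7,c8,c9,c10] (PySem.Int.floordiv (y - 2002) 2).toNat
           else [c0,c1,c2,c3,c4,c5,c6,c7,c8,c9,c10])) := by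
  by_cases hin : 2002 ≤ y ∧ y ≤ 2023
  · obtain ⟨hl, hr⟩ := hin
    interval_cases y <;>
      simp [pvTimePeriods, pvFindBump, pvBump, PySem.Int.floordiv, PySem.Dict.modify,
        PySem.Dict.insert, PySem.Dict.getD, PySem.Dict.get?, PySem.Dict.contains]
  · rw [if_neg hin]
    simp only [not_and, not_le] at hin
    rcases lt_or_ge y 2002 with h | h
    · simp [pvTimePeriods, pvFindBump, show ¬ 2002 ≤ y by omega, show ¬ 2004 ≤ y by omega,
        show ¬ 2006 ≤ y by omega, show ¬ 2008 ≤ y by omega, show ¬ 2010 ≤ y by omega,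
        show ¬ 2012 ≤ y by omega, show ¬ 2014 ≤ y by omega, show ¬ 2016 ≤ y by omega,
        show ¬ 2018 ≤ y by omega, show ¬ 2020 ≤ y by omega, show ¬ 2022 ≤ y by omega]
    · have h24 : 2023 < y := hin h
      simp [pvTimePeriods, pvFindBump, show ¬ y ≤ 2003 by omega, show ¬ y ≤ 2005 by omega,
        show ¬ y ≤ 2007 by omega, show ¬ y ≤ 2009 by omega, show ¬ y ≤ 2011 by omega,
        show ¬ y ≤ 2013 by omega, show ¬ y ≤ 2015 by omega, show ¬ y ≤ 2017 by omega,
        show ¬ y ≤ 2019 by omega, show ¬ y ≤ 2021 by omega, show ¬ y ≤ 2023 by omega]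

-- pv_step restated for any counts list of length 11
theorem pv_step' (cs : List Int) (h : cs.length = 11) (y : Int) :
    pvFindBump (PySem.Dict.mk (pvTimePeriods.zip cs)) y pvTimePeriods
      = PySem.Dict.mk (pvTimePeriods.zip
          (if 2002 ≤ y ∧ y ≤ 2023
           then pvBump cs (PySem.Int.floordiv (y - 2002) 2).toNat
           else cs)) := by
  rcases cs with _ | ⟨c0, _ | ⟨c1, _ | ⟨c2, _ | ⟨c3, _ | ⟨c4, _ | ⟨c5, _ | ⟨c6, _ | ⟨c7, _ | ⟨c8, _ | ⟨c9, _ | ⟨c10, _ | ⟨c11, tl⟩⟩⟩⟩⟩⟩⟩⟩⟩⟩⟩⟩ <;>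
    simp at h
  exact pv_step _ c0 c1 c2 c3 c4 c5 c6 c7 c8 c9 c10

theorem pv_fold (pb : List (String × Int × String)) :
    ∀ (cs : List Int), cs.length = 11 →
    pb.foldl (fun d b => pvFindBump d b.2.1 pvTimePeriods) (PySem.Dict.mk (pvTimePeriods.zip cs))
      = PySem.Dict.mk (pvTimePeriods.zip
          (pb.foldl (fun cs b =>
              if 2002 ≤ b.2.1 ∧ b.2.1 ≤ 2023
              then pvBump cs (PySem.Int.floordiv (b.2.1 - 2002) 2).toNat
              else cs) cs)) := by
  induction pb with
  | nil => intro cs h; rfl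
  | cons b rest ih =>
    intro cs h
    simp only [List.foldl_cons]
    rw [pv_step' cs h b.2.1]
    apply ih
    split
    · simp [pvBump, h]
    · exact h

-- ===== VERDICT (by name: the statement is the Claim_ definition above) =====
theorem count_books_by_period_spec : Claim_equal_count_books_by_period := by
  unfold Claim_equal_count_books_by_period
  intro pb _
  unfold Spec_count_books_by_period count_books_by_period count_books_by_period_alt
  exact congrArg (fun d => d.items.map (fun pc => (pc.1.1, pc.1.2, pc.2)))
    (pv_fold pb (List.replicate 11 0) (by simp))
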